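-- pv_equiv track=rewrite | github.com/y3bishop3y/cthulhu-dmd | scripts/core/parsing/text.py | find_power_section
-- ===== SOURCE A (Python) =====
-- from typing import Dict, Final, List, Optional, Tuple
--
-- def find_power_section(text: str, power_name: str, context_lines: int = 5) -> Optional[str]:
--     """Find the section of text related to a specific power.
--
--     Args:
--         text: Full text to search
--         power_name: Name of the power to find
--         context_lines: Number of lines of context to include
--
--     Returns:
--         Power section text if found, None otherwise
--     """
--     lines = text.split("\n")
--     power_start = None
--
--     # Find where the power is mentioned
--     for i, line in enumerate(lines):
--         if power_name.lower() in line.lower():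
--             power_start = i
--             break
--
--     if power_start is None:
--         return None
--
--     # Extract section with context
--     start = max(0, power_start - context_lines)
--     end = min(len(lines), power_start + 20)  # Look ahead more
--
--     section_lines = lines[start:end]
--     return "\n".join(section_lines)
-- ===== SOURCE B (Python) =====
-- def find_power_section(text: str, power_name: str, context_lines: int = 5):
--     """Character-offset search instead of a per-line scan:
--     one find on the lowered text, then the line index is the number of
--     newlines before the match position."""
--     needle = power_name.lower()
--     if "\n" in needle:
--         return None  # a needle with a newline can never sit inside one line
--     pos = text.lower().find(needle)
--     if pos == -1:
--         return None
--     lines = text.split("\n")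
--     line_no = text[:pos].count("\n")
--     start = max(0, line_no - context_lines)
--     end = min(len(lines), line_no + 20)
--     return "\n".join(lines[start:end])
-- ===== Notes on version B (the rewrite author's own statement) =====
-- stated objective: alternative
-- what changed: A scans the split lines one by one testing substring containment per line; B does a single substring search on the lowered whole text and recovers the line index by counting newlines before the match position (a newline inside the needle is rejected up front, since such a needle can never occur inside one line).
import Mathlib
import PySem

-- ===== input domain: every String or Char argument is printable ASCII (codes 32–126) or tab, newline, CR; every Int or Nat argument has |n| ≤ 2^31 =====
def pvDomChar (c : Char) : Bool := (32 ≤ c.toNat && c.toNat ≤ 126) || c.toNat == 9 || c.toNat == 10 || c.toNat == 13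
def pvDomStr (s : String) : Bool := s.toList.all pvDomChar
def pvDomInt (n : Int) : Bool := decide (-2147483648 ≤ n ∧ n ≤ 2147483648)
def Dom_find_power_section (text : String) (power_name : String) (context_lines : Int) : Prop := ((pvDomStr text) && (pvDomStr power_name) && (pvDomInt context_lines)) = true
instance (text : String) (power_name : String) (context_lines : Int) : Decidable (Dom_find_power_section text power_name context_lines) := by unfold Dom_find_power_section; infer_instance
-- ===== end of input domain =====

-- B replaces A's per-line scanning loop by one substring search on the lowered text
-- plus a newline count before the match position (alternative decomposition, same result).

-- ===== PORT A =====
-- the 'for i, line in enumerate(lines): if power_name.lower() in line.lower(): … break' loop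
def findPowerLoop (power_name : String) : List (Int × String) → Option Int
  | [] => none
  | (i, line) :: rest =>
    if PySem.Str.isIn (PySem.Str.lower power_name) (PySem.Str.lower line) then some i
    else findPowerLoop power_name rest

def find_power_section (text : String) (power_name : String) (context_lines : Int) : Option String :=
  let lines := (PySem.Chars.splitOn text.toList ['\n']).map String.ofList  -- text.split("\n")
  match findPowerLoop power_name (PySem.List.enumerate lines 0) with
  | none => none
  | some power_start =>
    let start := max 0 (power_start - context_lines)
    let «end» := min (lines.length : Int) (power_start + 20)
    some (PySem.Str.join "\n" (PySem.List.slice lines (some start) (some «end»)))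

-- ===== PORT B =====
def find_power_section_alt (text : String) (power_name : String) (context_lines : Int) : Option String :=
  let needle := PySem.Str.lower power_name
  if PySem.Str.isIn "\n" needle then none
  else
    let pos := PySem.Str.find (PySem.Str.lower text) needle
    if pos = -1 then none
    else
      let lines := (PySem.Chars.splitOn text.toList ['\n']).map String.ofList  -- text.split("\n")
      let line_no : Int := (PySem.Str.count (PySem.Str.slice text none (some pos)) "\n" : Int)
      let start := max 0 (line_no - context_lines)
      let «end» := min (lines.length : Int) (line_no + 20)
      some (PySem.Str.join "\n" (PySem.List.slice lines (some start) (some «end»)))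

-- ===== PRECONDITION & SPEC =====
def Spec_find_power_section (text : String) (power_name : String) (context_lines : Int) (out : Option String) : Prop := out = find_power_section_alt text power_name context_lines
instance (text : String) (power_name : String) (context_lines : Int) (out : Option String) : Decidable (Spec_find_power_section text power_name context_lines out) := by unfold Spec_find_power_section; infer_instance

-- ===== CLAIM (what is proved, stated in full; the proofs are below) =====
def Claim_equal_find_power_section : Prop := ∀ (text : String) (power_name : String) (context_lines : Int), Dom_find_power_section text power_name context_lines → Spec_find_power_section text power_name context_lines (find_power_section text power_name context_lines)

-- ===== LEMMAS AND PROOFS =====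

-- the line structure of a character list: 'splitOn cs ['\n']' computed structurally
def linesOf : List Char → List (List Char)
  | [] => [[]]
  | c :: rest => if c = '\n' then [] :: linesOf rest else (linesOf rest).modifyHead (c :: ·)

lemma linesOf_ne_nil (cs : List Char) : linesOf cs ≠ [] := by
  induction cs with
  | nil => simp [linesOf]
  | cons c rest ih =>
    simp only [linesOf]
    split_ifs <;> cases h : linesOf rest <;> simp_all [List.modifyHead]


lemma splitOn_go_newline (fuel : Nat) :
    ∀ (l cur : List Char) (acc : List (List Char)), l.length < fuel →
    PySem.Chars.splitOn.go ['\n'] fuel l cur acc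
      = acc.reverse ++ (linesOf l).modifyHead (cur.reverse ++ ·) := by
  induction fuel with
  | zero => intro l cur acc h; omega
  | succ fuel ih =>
    intro l cur acc h
    cases l with
    | nil => simp [PySem.Chars.splitOn.go, linesOf]
    | cons c rest =>
      by_cases hc : c = '\n'
      · subst hc
        rw [show PySem.Chars.splitOn.go ['\n'] (fuel+1) ('\n' :: rest) cur acc
              = PySem.Chars.splitOn.go ['\n'] fuel (List.drop 1 ('\n'::rest)) [] (cur.reverse :: acc) from by
            simp [PySem.Chars.splitOn.go, List.isPrefixOf]]
        rw [ih _ _ _ (by simp at h ⊢; omega)]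
        simp [linesOf, List.modifyHead]
        cases hL : linesOf rest <;> simp [List.modifyHead]
      · rw [show PySem.Chars.splitOn.go ['\n'] (fuel+1) (c :: rest) cur acc
              = PySem.Chars.splitOn.go ['\n'] fuel rest (c :: cur) acc from by
            simp [PySem.Chars.splitOn.go, List.isPrefixOf, Ne.symm hc]]
        rw [ih _ _ _ (by simp at h ⊢; omega)]
        simp only [linesOf, hc, if_false, List.modifyHead_modifyHead]
        congr 1
        cases hL : linesOf rest <;> simp [List.modifyHead, Function.comp]

lemma splitOn_newline (cs : List Char) :
    PySem.Chars.splitOn cs ['\n'] = linesOf cs := by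
  rw [PySem.Chars.splitOn, splitOn_go_newline _ _ _ _ (by omega)]
  cases h : linesOf cs <;> simp [List.modifyHead]

lemma count_go_newline (fuel : Nat) :
    ∀ (l : List Char) (acc : Nat), l.length ≤ fuel →
    PySem.Chars.count.go ['\n'] fuel l acc = acc + l.count '\n' := by
  induction fuel with
  | zero => intro l acc h
            cases l with
            | nil => simp [PySem.Chars.count.go]
            | cons c r => simp at h
  | succ fuel ih =>
    intro l acc h
    cases l with
    | nil => simp [PySem.Chars.count.go]
    | cons c rest =>
      by_cases hc : c = '\n'
      · subst hc
        rw [show PySem.Chars.count.go ['\n'] (fuel+1) ('\n'::rest) acc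
              = PySem.Chars.count.go ['\n'] fuel (List.drop 1 ('\n'::rest)) (acc+1) from by
            simp [PySem.Chars.count.go, List.isPrefixOf]]
        rw [ih _ _ (by simp at h ⊢; omega)]
        simp [List.count_cons]
        omega
      · rw [show PySem.Chars.count.go ['\n'] (fuel+1) (c::rest) acc
              = PySem.Chars.count.go ['\n'] fuel rest acc from by
            simp [PySem.Chars.count.go, List.isPrefixOf, Ne.symm hc]]
        rw [ih _ _ (by simp at h ⊢; omega)]
        simp [List.count_cons, hc]

lemma count_newline (cs : List Char) :
    PySem.Chars.count cs ['\n'] = cs.count '\n' := by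
  rw [PySem.Chars.count]
  simp [count_go_newline cs.length cs 0 (le_refl _)]

lemma lowerChar_newline_iff (c : Char) : PySem.Chars.lowerChar c = '\n' ↔ c = '\n' := by
  rw [PySem.Chars.lowerChar]
  split_ifs with h
  · constructor
    · intro he
      exfalso
      rw [PySem.Chars.isupper] at h
      simp at h
      obtain ⟨h1, h2⟩ := h
      have hA : 65 ≤ c.toNat := h1
      have hZ : c.toNat ≤ 90 := h2
      have hv : (c.toNat + 32).isValidChar := Or.inl (by omega)
      have := congrArg Char.toNat he
      rw [Char.toNat_ofNat, if_pos hv] at this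
      have h10 : ('\n').toNat = 10 := rfl
      omega
    · intro he; subst he; rw [PySem.Chars.isupper] at h; simp at h
  · exact Iff.rfl

lemma no_newline_of_mem_linesOf (cs l : List Char) (h : l ∈ linesOf cs) : '\n' ∉ l := by
  induction cs generalizing l with
  | nil => simp [linesOf] at h; subst h; simp
  | cons c rest ih =>
    simp only [linesOf] at h
    split_ifs at h with hc
    · rcases List.mem_cons.mp h with h | h
      · subst h; simp
      · exact ih _ h
    · cases hL : linesOf rest with
      | nil => exact absurd hL (linesOf_ne_nil rest)
      | cons a t =>
        rw [hL] at h
        simp [List.modifyHead] at h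
        rcases h with h | h
        · subst h
          intro hmem
          rcases List.mem_cons.mp hmem with h' | h'
          · exact hc h'.symm
          · exact ih a (by rw [hL]; exact List.mem_cons_self) h'
        · exact ih _ (by rw [hL]; exact List.mem_cons_of_mem _ h)

lemma join_linesOf (cs : List Char) : PySem.Chars.join ['\n'] (linesOf cs) = cs := by
  induction cs with
  | nil => simp [linesOf, PySem.Chars.join_singleton]
  | cons c rest ih =>
    simp only [linesOf]
    split_ifs with hc
    · subst hc
      cases hL : linesOf rest with
      | nil => exact absurd hL (linesOf_ne_nil rest)
      | cons a t =>
        rw [PySem.Chars.join_cons_cons]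
        rw [hL] at ih
        simp [ih]
    · cases hL : linesOf rest with
      | nil => exact absurd hL (linesOf_ne_nil rest)
      | cons a t =>
        rw [hL] at ih
        cases t with
        | nil =>
          simp [List.modifyHead, PySem.Chars.join_singleton] at ih ⊢
          simp [ih]
        | cons b t' =>
          simp only [List.modifyHead]
          rw [PySem.Chars.join_cons_cons] at ih ⊢
          simp at ih ⊢
          simp [← ih]

lemma linesOf_lower (cs : List Char) :
    linesOf (PySem.Chars.lower cs) = (linesOf cs).map PySem.Chars.lower := by
  induction cs with
  | nil => simp [linesOf, PySem.Chars.lower]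
  | cons c rest ih =>
    simp only [PySem.Chars.lower, List.map_cons, linesOf]
    rw [show (List.map PySem.Chars.lowerChar rest) = PySem.Chars.lower rest from rfl]
    by_cases hc : c = '\n'
    · subst hc
      rw [if_pos ((lowerChar_newline_iff '\n').mpr rfl), if_pos rfl]
      rw [PySem.Chars.lower] at ih ⊢
      rw [ih, List.map_cons]
      simp [PySem.Chars.lower]
    · rw [if_neg (by rw [lowerChar_newline_iff]; exact hc), if_neg hc, ih]
      cases hL : linesOf rest <;> simp [List.modifyHead, PySem.Chars.lower]

lemma count_newline_lower (cs : List Char) :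
    (PySem.Chars.lower cs).count '\n' = cs.count '\n' := by
  rw [PySem.Chars.lower]
  rw [List.count_eq_countP, List.count_eq_countP, List.countP_map]
  apply List.countP_congr
  intro c _
  simp only [Function.comp_apply, beq_iff_eq]
  exact lowerChar_newline_iff c

lemma find_eq_of (s p : List Char) (n : Nat) (h1 : p <+: s.drop n)
    (h2 : ∀ i < n, ¬ p <+: s.drop i) : PySem.Chars.find s p = n := by
  have hin : PySem.Chars.isIn p s = true :=
    (PySem.Chars.exists_prefix_drop_iff_isIn p s).mp ⟨n, h1⟩
  have hnn : 0 ≤ PySem.Chars.find s p := by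
    rw [PySem.Chars.find_nonneg_iff]
    exact (PySem.Chars.isIn_iff_infix p s).mp hin
  obtain ⟨hpre, hmin⟩ := PySem.Chars.find_spec hnn
  have : (PySem.Chars.find s p).toNat = n := by
    by_contra hne
    rcases lt_or_ge (PySem.Chars.find s p).toNat n with hlt | hge
    · exact h2 _ hlt hpre
    · exact hmin n (by omega) h1
  omega

lemma prefix_block_iff (p l s' : List Char) (hp : '\n' ∉ p) (hl : '\n' ∉ l)
    (i : Nat) (hi : i ≤ l.length) :
    p <+: (l ++ '\n' :: s').drop i ↔ p <+: l.drop i := by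
  rw [List.drop_append_of_le_length hi]
  constructor
  · intro h
    by_cases hle : p.length ≤ (l.drop i).length
    · have hpe : p = ((l.drop i) ++ '\n' :: s').take p.length := List.prefix_iff_eq_take.mp h
      rw [List.take_append_of_le_length hle] at hpe
      rw [hpe]
      exact List.take_prefix _ _
    · exfalso
      have hgt : (l.drop i).length < p.length := by omega
      obtain ⟨t, ht⟩ := h
      have hgp : p[(l.drop i).length]? = some '\n' := by
        have h1 : (p ++ t)[(l.drop i).length]? = p[(l.drop i).length]? :=
          List.getElem?_append_left hgt
        rw [ht] at h1
        rw [List.getElem?_append_right (le_refl _)] at h1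
        simpa using h1.symm
      exact hp (List.mem_of_getElem? hgp)
  · intro h
    exact h.trans (List.prefix_append _ _)

-- first index of a line containing p (already lowered lines)
def firstIdx (p : List Char) : List (List Char) → Option Nat
  | [] => none
  | l :: L => if PySem.Chars.isIn p l then some 0 else (firstIdx p L).map (· + 1)

lemma firstIdx_eq_none (p : List Char) (L : List (List Char))
    (h : ∀ l ∈ L, PySem.Chars.isIn p l = false) : firstIdx p L = none := by
  induction L with
  | nil => rfl
  | cons l L ih =>
    simp only [firstIdx, h l List.mem_cons_self, Bool.false_eq_true, if_false]
    rw [ih (fun x hx => h x (List.mem_cons_of_mem _ hx))]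
    rfl

lemma take_count_zero (l : List Char) (hl : '\n' ∉ l) (n : Nat) :
    (l.take n).count '\n' = 0 :=
  List.count_eq_zero.mpr (fun h => hl (List.mem_of_mem_take h))


-- the central lemma: the first line containing p versus the first occurrence of p
lemma main_lemma (p : List Char) (hp : '\n' ∉ p) (L : List (List Char)) (hL : L ≠ [])
    (hfree : ∀ l ∈ L, '\n' ∉ l) :
    (firstIdx p L = none → PySem.Chars.find (PySem.Chars.join ['\n'] L) p = -1) ∧
    (∀ i, firstIdx p L = some i →
      0 ≤ PySem.Chars.find (PySem.Chars.join ['\n'] L) p ∧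
      ((PySem.Chars.join ['\n'] L).take
        (PySem.Chars.find (PySem.Chars.join ['\n'] L) p).toNat).count '\n' = i) := by
  induction L with
  | nil => exact absurd rfl hL
  | cons l L' ih =>
    have hl : '\n' ∉ l := hfree l List.mem_cons_self
    by_cases hin : PySem.Chars.isIn p l = true
    · -- p occurs in the first line
      cases L' with
      | nil =>
        rw [PySem.Chars.join_singleton]
        constructor
        · intro hnone; simp [firstIdx, hin] at hnone
        · intro i hi
          simp [firstIdx, hin] at hi
          subst hi
          have hnn : 0 ≤ PySem.Chars.find l p := by
            rw [PySem.Chars.find_nonneg_iff]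
            exact (PySem.Chars.isIn_iff_infix p l).mp hin
          exact ⟨hnn, take_count_zero l hl _⟩
      | cons b t =>
        rw [PySem.Chars.join_cons_cons]
        set s' := PySem.Chars.join ['\n'] (b :: t) with hs'
        have hjoin : l ++ ['\n'] ++ s' = l ++ '\n' :: s' := by simp
        rw [hjoin]
        have hnn : 0 ≤ PySem.Chars.find l p := by
          rw [PySem.Chars.find_nonneg_iff]
          exact (PySem.Chars.isIn_iff_infix p l).mp hin
        obtain ⟨hpre, hmin⟩ := PySem.Chars.find_spec hnn
        have hmle : (PySem.Chars.find l p).toNat ≤ l.length := by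
          have := PySem.Chars.find_le_length l p
          omega
        have hfind : PySem.Chars.find (l ++ '\n' :: s') p = ((PySem.Chars.find l p).toNat : Int) := by
          apply find_eq_of
          · exact (prefix_block_iff p l s' hp hl _ hmle).mpr hpre
          · intro i hi
            rw [prefix_block_iff p l s' hp hl i (by omega)]
            exact hmin i hi
        constructor
        · intro hnone; simp [firstIdx, hin] at hnone
        · intro i hi
          simp [firstIdx, hin] at hi
          subst hi
          rw [hfind]
          refine ⟨by positivity, ?_⟩
          rw [Int.toNat_natCast, List.take_append_of_le_length hmle]
          exact take_count_zero l hl _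
    · -- p does not occur in the first line
      have hinf : ¬ p <:+: l := by
        rw [← PySem.Chars.isIn_iff_infix]; simpa using hin
      have hpne : p ≠ [] := by
        intro h; subst h; exact hin (PySem.Chars.isIn_nil l)
      cases L' with
      | nil =>
        rw [PySem.Chars.join_singleton]
        constructor
        · intro _
          rw [PySem.Chars.find_eq_neg_one_iff]
          exact hinf
        · intro i hi
          simp [firstIdx, hin] at hi
      | cons b t =>
        have ih' := ih (by simp) (fun x hx => hfree x (List.mem_cons_of_mem _ hx))
        rw [PySem.Chars.join_cons_cons]
        set s' := PySem.Chars.join ['\n'] (b :: t) with hs'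
        have hjoin : l ++ ['\n'] ++ s' = l ++ '\n' :: s' := by simp
        rw [hjoin]
        have hdrop : ∀ k : Nat, (l ++ '\n' :: s').drop (l.length + 1 + k) = s'.drop k := by
          intro k
          rw [show l.length + 1 + k = l.length + (1 + k) by omega, List.drop_append]
          rw [List.drop_of_length_le (by omega), List.nil_append]
          rw [show l.length + (1 + k) - l.length = k + 1 by omega]
          rfl
        cases hfi : firstIdx p (b :: t) with
        | none =>
          have hfneg : PySem.Chars.find s' p = -1 := (ih'.1) hfi
          have hninf : ¬ p <:+: s' := by
            rwa [← PySem.Chars.find_eq_neg_one_iff]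
          constructor
          · intro _
            rw [PySem.Chars.find_eq_neg_one_iff]
            intro hcon
            have : PySem.Chars.isIn p (l ++ '\n' :: s') = true :=
              (PySem.Chars.isIn_iff_infix _ _).mpr hcon
            obtain ⟨j, hj⟩ := (PySem.Chars.exists_prefix_drop_iff_isIn p _).mpr this
            by_cases hjl : j ≤ l.length
            · have := (prefix_block_iff p l s' hp hl j hjl).mp hj
              exact hinf (List.IsPrefix.isInfix this |>.trans (List.drop_suffix _ _).isInfix)
            · have hj' : j = l.length + 1 + (j - l.length - 1) := by omega
              rw [hj', hdrop] at hj
              exact hninf (hj.isInfix.trans (List.drop_suffix _ _).isInfix)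
          · intro i hi
            have hfold : firstIdx p (l :: b :: t) = (firstIdx p (b :: t)).map (· + 1) := by
              simp [firstIdx, hin]
            rw [hfold, hfi] at hi
            cases hi
        | some i' =>
          obtain ⟨hnn', hcount'⟩ := (ih'.2) i' hfi
          obtain ⟨hpre', hmin'⟩ := PySem.Chars.find_spec hnn'
          have hfind : PySem.Chars.find (l ++ '\n' :: s') p
              = ((l.length + 1 + (PySem.Chars.find s' p).toNat : Nat) : Int) := by
            apply find_eq_of
            · rw [hdrop]; exact hpre'
            · intro i hi
              by_cases hil : i ≤ l.length
              · rw [prefix_block_iff p l s' hp hl i hil]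
                intro hcon
                exact hinf (hcon.isInfix.trans (List.drop_suffix _ _).isInfix)
              · have hi' : i = l.length + 1 + (i - l.length - 1) := by omega
                rw [hi', hdrop]
                exact hmin' _ (by omega)
          constructor
          · intro hnone
            have hfold : firstIdx p (l :: b :: t) = (firstIdx p (b :: t)).map (· + 1) := by
              simp [firstIdx, hin]
            rw [hfold, hfi] at hnone
            cases hnone
          · intro i hi
            have hfold : firstIdx p (l :: b :: t) = (firstIdx p (b :: t)).map (· + 1) := by
              simp [firstIdx, hin]
            rw [hfold, hfi] at hi
            simp at hi
            rw [hfind]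
            refine ⟨by positivity, ?_⟩
            rw [Int.toNat_natCast]
            rw [show l.length + 1 + (PySem.Chars.find s' p).toNat
                  = l.length + (1 + (PySem.Chars.find s' p).toNat) by omega]
            rw [List.take_append]
            rw [List.count_append]
            rw [take_count_zero l hl]
            rw [show 1 + (PySem.Chars.find s' p).toNat = (PySem.Chars.find s' p).toNat + 1 by omega]
            rw [show l.length + ((PySem.Chars.find s' p).toNat + 1) - l.length
                  = (PySem.Chars.find s' p).toNat + 1 by omega]
            rw [List.take_succ_cons, List.count_cons]
            simp [hcount']
            omega

lemma findPowerLoop_eq (power_name : String) (L : List (List Char)) :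
    ∀ k : Int, findPowerLoop power_name (PySem.List.enumerate (L.map String.ofList) k)
      = (firstIdx (PySem.Chars.lower power_name.toList) (L.map PySem.Chars.lower)).map (fun i => k + i) := by
  induction L with
  | nil => intro k; simp [PySem.List.enumerate, findPowerLoop, firstIdx]
  | cons l L ih =>
    intro k
    rw [List.map_cons, PySem.List.enumerate_cons, findPowerLoop]
    have htest : PySem.Str.isIn (PySem.Str.lower power_name) (PySem.Str.lower (String.ofList l))
        = PySem.Chars.isIn (PySem.Chars.lower power_name.toList) (PySem.Chars.lower l) := by
      simp [PySem.Str.isIn]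
    rw [htest, List.map_cons, firstIdx]
    by_cases h : PySem.Chars.isIn (PySem.Chars.lower power_name.toList) (PySem.Chars.lower l) = true
    · simp [h]
    · simp only [h, Bool.false_eq_true, if_false]
      rw [ih (k + 1)]
      cases hfi : firstIdx (PySem.Chars.lower power_name.toList) (L.map PySem.Chars.lower) with
      | none => simp
      | some i => simp; omega

-- ===== VERDICT (by name: the statement is the Claim_ definition above) =====
theorem find_power_section_spec : Claim_equal_find_power_section := by
  intro text pn cl _
  show find_power_section text pn cl = find_power_section_alt text pn cl
  rw [find_power_section, find_power_section_alt]
  simp only [splitOn_newline]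
  rw [findPowerLoop_eq]
  by_cases hnl : '\n' ∈ PySem.Chars.lower pn.toList
  · have hB : PySem.Str.isIn "\n" (PySem.Str.lower pn) = true := by
      have : PySem.Chars.isIn ['\n'] (PySem.Chars.lower pn.toList) = true := by
        rw [PySem.Chars.isIn_iff_infix]
        obtain ⟨s1, t1, h⟩ := List.append_of_mem hnl
        exact ⟨s1, t1, by rw [h]; simp⟩
      simpa [PySem.Str.isIn] using this
    rw [if_pos hB]
    have hnone : firstIdx (PySem.Chars.lower pn.toList)
        ((linesOf text.toList).map PySem.Chars.lower) = none := by
      apply firstIdx_eq_none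
      intro l hl
      rw [PySem.Chars.isIn_eq_false_iff]
      intro hcon
      obtain ⟨l0, hl0, rfl⟩ := List.mem_map.mp hl
      have h1 : '\n' ∈ PySem.Chars.lower l0 := hcon.subset hnl
      rw [PySem.Chars.lower] at h1
      obtain ⟨c, hc, hceq⟩ := List.mem_map.mp h1
      rw [lowerChar_newline_iff] at hceq
      exact no_newline_of_mem_linesOf _ _ hl0 (hceq ▸ hc)
    rw [hnone]
    rfl
  · have hB : PySem.Str.isIn "\n" (PySem.Str.lower pn) = false := by
      have : PySem.Chars.isIn ['\n'] (PySem.Chars.lower pn.toList) = false := by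
        rw [PySem.Chars.isIn_eq_false_iff]
        intro hcon
        exact hnl (hcon.subset (by simp))
      simpa [PySem.Str.isIn] using this
    rw [hB]
    simp only [Bool.false_eq_true, if_false]
    have hml := main_lemma (PySem.Chars.lower pn.toList) hnl
      (linesOf (PySem.Chars.lower text.toList)) (linesOf_ne_nil _)
      (fun l hl => no_newline_of_mem_linesOf _ _ hl)
    rw [join_linesOf, linesOf_lower] at hml
    have hpos : PySem.Str.find (PySem.Str.lower text) (PySem.Str.lower pn)
        = PySem.Chars.find (PySem.Chars.lower text.toList) (PySem.Chars.lower pn.toList) := by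
      simp [PySem.Str.find]
    rw [hpos]
    cases hfi : firstIdx (PySem.Chars.lower pn.toList)
        ((linesOf text.toList).map PySem.Chars.lower) with
    | none =>
      rw [hml.1 hfi]
      rfl
    | some i =>
      obtain ⟨hge, hcnt⟩ := hml.2 i hfi
      rw [if_neg (by omega)]
      have hsc : (Option.map (fun j => (0 : Int) + j) (do let a ← some i; pure ((a : Int))))
          = some ((i : Int)) := by simp
      rw [hsc]
      have hcount : (PySem.Str.count
          (PySem.Str.slice text none (some (PySem.Chars.find (PySem.Chars.lower text.toList) (PySem.Chars.lower pn.toList)))) "\n" : Int)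
          = ((i : Nat) : Int) := by
        have h1 : (PySem.Str.slice text none (some (PySem.Chars.find (PySem.Chars.lower text.toList) (PySem.Chars.lower pn.toList)))).toList
            = text.toList.take (PySem.Chars.find (PySem.Chars.lower text.toList) (PySem.Chars.lower pn.toList)).toNat := by
          simp [PySem.Str.slice]
          rw [PySem.List.slice_to text.toList hge]
        have h2 : PySem.Str.count (PySem.Str.slice text none (some (PySem.Chars.find (PySem.Chars.lower text.toList) (PySem.Chars.lower pn.toList)))) "\n"
            = PySem.Chars.count ((PySem.Str.slice text none (some (PySem.Chars.find (PySem.Chars.lower text.toList) (PySem.Chars.lower pn.toList)))).toList) ['\n'] := by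
          simp [PySem.Str.count]
        rw [h2, h1, count_newline]
        have h3 : (text.toList.take (PySem.Chars.find (PySem.Chars.lower text.toList) (PySem.Chars.lower pn.toList)).toNat).count '\n'
            = ((PySem.Chars.lower text.toList).take (PySem.Chars.find (PySem.Chars.lower text.toList) (PySem.Chars.lower pn.toList)).toNat).count '\n' := by
          rw [← count_newline_lower, PySem.Chars.lower, PySem.Chars.lower, List.map_take]
        rw [h3, hcnt]
      rw [hcount]
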